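-- pv_equiv track=rewrite | github.com/NimbleBrainInc/synapse-todo-board | tests/test_ui_contract.py | _top_level_keys
-- ===== SOURCE A (Python) =====
-- def _skip_string(text: str, i: int) -> int:
--     """Advance past a string literal starting at `text[i]`. Handles `"`, `'`, and backticks."""
--     quote = text[i]
--     i += 1
--     while i < len(text):
--         if text[i] == "\\":
--             i += 2
--             continue
--         if text[i] == quote:
--             return i + 1
--         i += 1
--     return i  # unterminated — treat as consumed
--
-- def _top_level_keys(obj_content: str) -> set[str]:
--     """Extract top-level property-name keys from an object literal's body.
--
--     Handles:
--       - explicit `key: value` pairs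
--       - shorthand `{ title, priority }` properties
--       - nested objects / arrays / calls (skipped; only depth-0 keys count)
--       - string values that contain `{`, `:`, or `,`
--
--     Doesn't attempt to handle computed keys (`[foo]:`) or string-literal
--     keys (`"foo":`). Neither is in use in this UI; the cost isn't worth it.
--     """
--     keys: set[str] = set()
--     depth = 0
--     in_key_position = True
--     i = 0
--     n = len(obj_content)
--     while i < n:
--         c = obj_content[i]
--         if c in '"\'`':
--             i = _skip_string(obj_content, i)
--             continue
--         if c in "{[(":
--             depth += 1
--             i += 1
--             continue
--         if c in "}])":
--             depth -= 1
--             i += 1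
--             continue
--         if depth != 0:
--             i += 1
--             continue
--         if c == ",":
--             in_key_position = True
--             i += 1
--             continue
--         if c == ":":
--             in_key_position = False
--             i += 1
--             continue
--         if in_key_position and (c.isalpha() or c in "_$"):
--             j = i
--             while j < n and (obj_content[j].isalnum() or obj_content[j] in "_$"):
--                 j += 1
--             keys.add(obj_content[i:j])
--             # Don't flip in_key_position here — shorthand ends at `,` or `}`,
--             # explicit pair ends at `:`. Both transitions are handled above.
--             i = j
--             continue
--         i += 1
--     return keys
-- ===== SOURCE B (Python) =====
-- def _top_level_keys(obj_content: str) -> set[str]: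
--     # Single forward fold over the characters with an explicit state machine:
--     # string literals and escapes are state components (quote/escaped) and the
--     # identifier being read is accumulated in a buffer (ident) and flushed at
--     # its boundary, instead of index-jumping inner while loops.
--     keys: set[str] = set()
--     depth = 0
--     in_key = True
--     quote = None      # current string-literal quote char, or None
--     escaped = False   # inside a string, previous char was a backslash
--     ident = None      # identifier chars being accumulated, or None
--     for c in obj_content:
--         if quote is not None:
--             if escaped:
--                 escaped = False
--             elif c == "\\":
--                 escaped = True
--             elif c == quote:
--                 quote = None
--             continue
--         if ident is not None:
--             if c.isalnum() or c in "_$":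
--                 ident += c
--                 continue
--             keys.add(ident)
--             ident = None
--             # fall through: c itself still gets processed below
--         if c in '"\'`':
--             quote = c
--         elif c in "{[(":
--             depth += 1
--         elif c in "}])":
--             depth -= 1
--         elif depth != 0:
--             pass
--         elif c == ",":
--             in_key = True
--         elif c == ":":
--             in_key = False
--         elif in_key and (c.isalpha() or c in "_$"):
--             ident = c
--     if ident is not None:
--         keys.add(ident)
--     return keys
-- ===== Notes on version B (the rewrite author's own statement) =====
-- stated objective: alternative
-- what changed: A is an index-driven while loop with an index-jumping string-skip helper and an inner identifier-scanning while; B is a single for-each-character fold over an explicit state machine in which the string literal (quote/escaped flags) and the identifier being read (an accumulated buffer flushed at its boundary) are state components, with no index arithmetic.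
import Mathlib
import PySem

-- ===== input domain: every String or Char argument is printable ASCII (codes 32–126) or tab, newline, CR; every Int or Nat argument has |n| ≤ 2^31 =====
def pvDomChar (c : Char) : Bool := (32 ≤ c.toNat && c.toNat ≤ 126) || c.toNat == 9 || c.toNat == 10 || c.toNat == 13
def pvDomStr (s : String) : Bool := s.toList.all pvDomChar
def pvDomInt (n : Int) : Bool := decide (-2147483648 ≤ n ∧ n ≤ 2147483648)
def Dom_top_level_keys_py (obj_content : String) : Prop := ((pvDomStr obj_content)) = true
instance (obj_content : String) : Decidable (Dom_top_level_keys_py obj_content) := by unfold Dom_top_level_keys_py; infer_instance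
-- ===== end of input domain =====

-- B replaces A's index-jumping while loops (string-skip helper, inner identifier scan)
-- by a single foldl over the characters with an explicit state machine (alternative decomposition).

-- ===== PORT A =====
-- _skip_string: advance past a string literal; returns the remaining characters after it
def pvSkipStringA (quote : Char) : List Char → List Char
  | [] => []
  | c :: rest =>
    if c = '\\' then pvSkipStringA quote (rest.drop 1)   -- i += 2
    else if c = quote then rest                          -- return i + 1
    else pvSkipStringA quote rest
termination_by cs => cs.length
decreasing_by all_goals (simp; try omega)

theorem pvSkipStringA_len_le (quote : Char) (cs : List Char) :
    (pvSkipStringA quote cs).length ≤ cs.length := by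
  cases cs with
  | nil => simp [pvSkipStringA]
  | cons c rest =>
    rw [pvSkipStringA]
    split_ifs with h1 h2
    · exact le_trans (pvSkipStringA_len_le quote (rest.drop 1)) (by simp; omega)
    · simp
    · exact Nat.le_succ_of_le (pvSkipStringA_len_le quote rest)
termination_by cs.length
decreasing_by all_goals (simp; try omega)

def pvIdentStart (c : Char) : Bool := PySem.Chars.isalpha c || c = '_' || c = '$'
def pvIdentCont (c : Char) : Bool := PySem.Chars.isalnum c || c = '_' || c = '$'

-- an identifier start character is an identifier continuation character (used for A's termination)
theorem pvStart_cont (c : Char) (h : pvIdentStart c = true) : pvIdentCont c = true := by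
  by_cases hA : PySem.Chars.isalpha c = true
  · simp [pvIdentCont, PySem.Chars.isalnum, hA]
  · have hA' : PySem.Chars.isalpha c = false := by simpa using hA
    simp only [pvIdentStart, hA', Bool.false_or, Bool.or_eq_true] at h
    rcases h with h | h <;> simp [pvIdentCont, PySem.Chars.isalnum, h]

-- the main while loop of _top_level_keys, state = (keys, depth, in_key_position)
def pvLoopA (cs : List Char) (depth : Int) (ikp : Bool) (keys : PySem.Set String) :
    PySem.Set String :=
  match h : cs with
  | [] => keys
  | c :: rest =>
    if c = '"' ∨ c = '\'' ∨ c = '`' then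
      pvLoopA (pvSkipStringA c rest) depth ikp keys
    else if c = '{' ∨ c = '[' ∨ c = '(' then pvLoopA rest (depth + 1) ikp keys
    else if c = '}' ∨ c = ']' ∨ c = ')' then pvLoopA rest (depth - 1) ikp keys
    else if depth ≠ 0 then pvLoopA rest depth ikp keys
    else if c = ',' then pvLoopA rest depth true keys
    else if c = ':' then pvLoopA rest depth false keys
    else if ikp && pvIdentStart c then
      -- inner while: take the maximal identifier span starting at i
      pvLoopA ((c :: rest).dropWhile pvIdentCont) depth ikp
        (PySem.Set.add keys (String.ofList ((c :: rest).takeWhile pvIdentCont)))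
    else pvLoopA rest depth ikp keys
termination_by cs.length
decreasing_by
  · simpa using Nat.lt_succ_of_le (pvSkipStringA_len_le c rest)
  · simp
  · simp
  · simp
  · simp
  · simp
  · have hand : (ikp && pvIdentStart c) = true := by assumption
    have hc : pvIdentCont c = true := pvStart_cont c (by simp_all)
    simpa [List.dropWhile, hc] using Nat.lt_succ_of_le (List.length_dropWhile_le pvIdentCont rest)
  · simp

def top_level_keys_py (obj_content : String) : List String :=
  pvLoopA obj_content.toList 0 true PySem.Set.empty

-- ===== PORT B =====
-- the mutable locals of B's for-loop, as one state record
structure PvSt where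
  keys : PySem.Set String     -- keys
  depth : Int                 -- depth
  inKey : Bool                -- in_key
  quote : Option Char         -- quote (current string-literal quote, or None)
  escaped : Bool              -- escaped
  ident : Option (List Char)  -- ident (identifier being accumulated, or None)
deriving Repr

-- the if/elif chain run when not inside a string and no identifier falls through
def pvDispatch (st : PvSt) (c : Char) : PvSt :=
  if c = '"' ∨ c = '\'' ∨ c = '`' then { st with quote := some c }
  else if c = '{' ∨ c = '[' ∨ c = '(' then { st with depth := st.depth + 1 }
  else if c = '}' ∨ c = ']' ∨ c = ')' then { st with depth := st.depth - 1 }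
  else if st.depth ≠ 0 then st
  else if c = ',' then { st with inKey := true }
  else if c = ':' then { st with inKey := false }
  else if st.inKey && pvIdentStart c then { st with ident := some [c] }
  else st

-- one iteration of B's for-loop
def pvStep (st : PvSt) (c : Char) : PvSt :=
  match st.quote with
  | some q =>
    if st.escaped then { st with escaped := false }
    else if c = '\\' then { st with escaped := true }
    else if c = q then { st with quote := none }
    else st
  | none =>
    match st.ident with
    | some buf =>
      if pvIdentCont c then { st with ident := some (buf ++ [c]) }
      else pvDispatch { st with keys := PySem.Set.add st.keys (String.ofList buf), ident := none } c
    | none => pvDispatch st c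

-- after the loop: flush a pending identifier
def pvFinalize (st : PvSt) : PySem.Set String :=
  match st.ident with
  | some buf => PySem.Set.add st.keys (String.ofList buf)
  | none => st.keys

def top_level_keys_py_alt (obj_content : String) : List String :=
  pvFinalize (obj_content.toList.foldl pvStep ⟨PySem.Set.empty, 0, true, none, false, none⟩)

-- ===== PRECONDITION & SPEC =====
def Spec_top_level_keys_py (obj_content : String) (out : List String) : Prop := out = top_level_keys_py_alt obj_content
instance (obj_content : String) (out : List String) : Decidable (Spec_top_level_keys_py obj_content out) := by unfold Spec_top_level_keys_py; infer_instance

-- ===== CLAIM (what is proved, stated in full; the proofs are below) =====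
def Claim_equal_top_level_keys_py : Prop := ∀ (obj_content : String), Dom_top_level_keys_py obj_content → Spec_top_level_keys_py obj_content (top_level_keys_py obj_content)

-- ===== LEMMAS AND PROOFS =====

-- the final result of B's fold from a given state
def pvRun (cs : List Char) (st : PvSt) : PySem.Set String := pvFinalize (cs.foldl pvStep st)

theorem pvRun_cons (c : Char) (cs : List Char) (st : PvSt) :
    pvRun (c :: cs) st = pvRun cs (pvStep st c) := rfl

-- B in string-mode tracks A's _skip_string
theorem pvString_run (cs : List Char) (q : Char) (keys : PySem.Set String) (depth : Int)
    (ikp : Bool) :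
    pvRun cs ⟨keys, depth, ikp, some q, false, none⟩ =
      pvRun (pvSkipStringA q cs) ⟨keys, depth, ikp, none, false, none⟩ := by
  match cs with
  | [] => simp [pvRun, pvSkipStringA, pvFinalize]
  | c :: rest =>
    rw [pvRun_cons, pvSkipStringA]
    by_cases hb : c = '\\'
    · rw [if_pos hb]
      have h1 : pvStep ⟨keys, depth, ikp, some q, false, none⟩ c
          = ⟨keys, depth, ikp, some q, true, none⟩ := by simp [pvStep, hb]
      rw [h1]
      match rest with
      | [] => simp [pvRun, pvSkipStringA, pvFinalize]
      | d :: rest' =>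
        rw [pvRun_cons]
        have h2 : pvStep ⟨keys, depth, ikp, some q, true, none⟩ d
            = ⟨keys, depth, ikp, some q, false, none⟩ := by simp [pvStep]
        rw [h2]
        simpa using pvString_run rest' q keys depth ikp
    · rw [if_neg hb]
      by_cases hq : c = q
      · rw [if_pos hq]
        subst hq
        have h1 : pvStep ⟨keys, depth, ikp, some c, false, none⟩ c
            = ⟨keys, depth, ikp, none, false, none⟩ := by simp [pvStep, hb]
        rw [h1]
      · rw [if_neg hq]
        have h1 : pvStep ⟨keys, depth, ikp, some q, false, none⟩ c
            = ⟨keys, depth, ikp, some q, false, none⟩ := by simp [pvStep, hb, hq]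
        rw [h1]
        exact pvString_run rest q keys depth ikp
termination_by cs.length
decreasing_by all_goals (simp; try omega)

-- B in identifier-mode tracks A's inner identifier while-loop
theorem pvIdent_run (cs : List Char) (buf : List Char) (keys : PySem.Set String) (depth : Int)
    (ikp : Bool) :
    pvRun cs ⟨keys, depth, ikp, none, false, some buf⟩ =
      pvRun (cs.dropWhile pvIdentCont)
        ⟨PySem.Set.add keys (String.ofList (buf ++ cs.takeWhile pvIdentCont)),
          depth, ikp, none, false, none⟩ := by
  match cs with
  | [] => simp [pvRun, pvFinalize]
  | c :: rest =>
    by_cases hc : pvIdentCont c = true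
    · rw [pvRun_cons, List.dropWhile_cons_of_pos hc, List.takeWhile_cons_of_pos hc]
      have h1 : pvStep ⟨keys, depth, ikp, none, false, some buf⟩ c
          = ⟨keys, depth, ikp, none, false, some (buf ++ [c])⟩ := by simp [pvStep, hc]
      rw [h1, pvIdent_run rest (buf ++ [c]) keys depth ikp]
      simp
    · have hcf : pvIdentCont c = false := by simpa using hc
      rw [List.dropWhile_cons_of_neg (by simp [hcf]), List.takeWhile_cons_of_neg (by simp [hcf]),
        pvRun_cons, pvRun_cons]
      have h1 : pvStep ⟨keys, depth, ikp, none, false, some buf⟩ c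
          = pvStep ⟨PySem.Set.add keys (String.ofList (buf ++ [])), depth, ikp, none, false, none⟩ c := by
        simp [pvStep, hcf]
      rw [h1]

-- main correspondence: A's while-loop equals B's fold from the matching plain state
theorem pvMain (cs : List Char) (depth : Int) (ikp : Bool) (keys : PySem.Set String) :
    pvLoopA cs depth ikp keys = pvRun cs ⟨keys, depth, ikp, none, false, none⟩ := by
  match cs with
  | [] => simp [pvLoopA, pvRun, pvFinalize]
  | c :: rest =>
    rw [pvLoopA, pvRun_cons]
    have hstep : pvStep ⟨keys, depth, ikp, none, false, none⟩ c
        = pvDispatch ⟨keys, depth, ikp, none, false, none⟩ c := by simp [pvStep]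
    rw [hstep]
    by_cases hq : c = '"' ∨ c = '\'' ∨ c = '`'
    · rw [if_pos hq]
      simp only [pvDispatch, if_pos hq]
      rw [pvMain (pvSkipStringA c rest) depth ikp keys]
      exact (pvString_run rest c keys depth ikp).symm
    · rw [if_neg hq]; simp only [pvDispatch, if_neg hq]
      by_cases ho : c = '{' ∨ c = '[' ∨ c = '('
      · rw [if_pos ho, if_pos ho]; exact pvMain rest (depth + 1) ikp keys
      · rw [if_neg ho, if_neg ho]
        by_cases hc : c = '}' ∨ c = ']' ∨ c = ')'
        · rw [if_pos hc, if_pos hc]; exact pvMain rest (depth - 1) ikp keys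
        · rw [if_neg hc, if_neg hc]
          by_cases hd : depth ≠ 0
          · rw [if_pos hd, if_pos hd]; exact pvMain rest depth ikp keys
          · rw [if_neg hd, if_neg hd]
            by_cases hcomma : c = ','
            · rw [if_pos hcomma, if_pos hcomma]; exact pvMain rest depth true keys
            · rw [if_neg hcomma, if_neg hcomma]
              by_cases hcolon : c = ':'
              · rw [if_pos hcolon, if_pos hcolon]; exact pvMain rest depth false keys
              · rw [if_neg hcolon, if_neg hcolon]
                by_cases hid : (ikp && pvIdentStart c) = true
                · rw [if_pos hid, if_pos hid]
                  have hcC : pvIdentCont c = true := pvStart_cont c (by simp_all)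
                  rw [List.dropWhile_cons_of_pos hcC, List.takeWhile_cons_of_pos hcC]
                  rw [pvMain (rest.dropWhile pvIdentCont) depth ikp
                    (PySem.Set.add keys (String.ofList (c :: rest.takeWhile pvIdentCont)))]
                  rw [pvIdent_run rest [c] keys depth ikp]
                  simp
                · rw [if_neg hid, if_neg hid]; exact pvMain rest depth ikp keys
termination_by cs.length
decreasing_by
  · simpa using Nat.lt_succ_of_le (pvSkipStringA_len_le c rest)
  · simp
  · simp
  · simp
  · simp
  · simp
  · have hcC : pvIdentCont c = true := pvStart_cont c (by simp_all)
    simpa [List.dropWhile, hcC] using Nat.lt_succ_of_le (List.length_dropWhile_le pvIdentCont rest)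
  · simp

-- ===== VERDICT (by name: the statement is the Claim_ definition above) =====
theorem top_level_keys_py_spec : Claim_equal_top_level_keys_py := by
  intro s _
  unfold Spec_top_level_keys_py top_level_keys_py top_level_keys_py_alt
  exact pvMain s.toList 0 true PySem.Set.empty
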